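-- pv_equiv track=rewrite | github.com/ajcerqui/HW03 | Prob3.py | to_obenglobish
-- ===== SOURCE A (Python) =====
-- def to_obenglobish(word):
--     obenglobish_word = ""
--     vowels = "aeiou"
--
--     for i in range(len(word)):
--         # Checks if the current letter is a vowel
--         if word[i] in vowels:
--             # If the first letter is a vowel it adds ob to beginning
--             if i == 0:
--                 obenglobish_word += "ob"
--             # Adds ob before vowel as long as the previous letter is not a vowel
--             elif word[i - 1] not in vowels:
--                 obenglobish_word += "ob"
--         # Checks if last character is E and then doest not add ob
--         elif word[i] == 'e' and i == len(word) - 1: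
--             pass
--         # Add the current character to the Obenglobish word
--         obenglobish_word += word[i]
--
--     return obenglobish_word
-- ===== SOURCE B (Python) =====
-- def to_obenglobish(word):
--     # Prefix every maximal run of lowercase vowels with "ob".
--     parts = []
--     i = 0
--     n = len(word)
--     while i < n:
--         if word[i] in "aeiou":
--             j = i
--             while j < n and word[j] in "aeiou":
--                 j += 1
--             parts.append("ob")
--             parts.append(word[i:j])
--             i = j
--         else:
--             parts.append(word[i])
--             i += 1
--     return "".join(parts)
-- ===== Notes on version B (the rewrite author's own statement) =====
-- stated objective: alternative
-- what changed: Replaced the per-index loop with previous-character lookback (and its dead 'e'-last-char branch) by a run scanner that finds each maximal run of lowercase vowels and prefixes it with 'ob' in one piece.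
import Mathlib
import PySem

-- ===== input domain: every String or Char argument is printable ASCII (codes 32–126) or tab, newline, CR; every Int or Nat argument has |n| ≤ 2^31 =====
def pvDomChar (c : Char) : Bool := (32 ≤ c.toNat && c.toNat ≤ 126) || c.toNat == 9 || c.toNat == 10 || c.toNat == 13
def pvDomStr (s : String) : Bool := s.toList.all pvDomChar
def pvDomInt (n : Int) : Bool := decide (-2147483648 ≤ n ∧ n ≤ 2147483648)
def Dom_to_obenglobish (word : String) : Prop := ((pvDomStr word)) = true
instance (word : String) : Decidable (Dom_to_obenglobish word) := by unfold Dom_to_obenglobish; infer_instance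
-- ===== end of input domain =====

-- B replaces A's per-index loop with previous-character lookback by a maximal-vowel-run
-- scanner (objective: alternative); equivalence of return values is proved for all strings.

-- ===== PORT A =====
-- A's index loop over range(len(word)); the string accumulator is kept as a List Char
-- and packed with String.mk at the end.
def pvVowels : List Char := ['a', 'e', 'i', 'o', 'u']

def to_obenglobish (word : String) : String :=
  let cs := word.toList
  let acc := (PySem.List.pyRange 0 (cs.length : Int) 1).foldl
    (fun (acc : List Char) (i : Int) =>
      let c := cs.getD i.toNat ' '
      let acc :=
        if pvVowels.contains c then
          if i == 0 then acc ++ ['o', 'b']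
          else if !(pvVowels.contains (cs.getD (i - 1).toNat ' ')) then acc ++ ['o', 'b']
          else acc
        else if c == 'e' && i == (cs.length : Int) - 1 then acc  -- dead 'pass' branch kept literally
        else acc
      acc ++ [c]) []
  String.mk acc

-- ===== PORT B =====
-- Source B's run scanner: the inner `while j < n and word[j] in "aeiou"` plus the slice
-- word[i:j] is exactly takeWhile/dropWhile on the remaining characters.
def pvIsVowel (c : Char) : Bool := pvVowels.contains c

def pvRuns : List Char → List Char
  | [] => []
  | c :: rest =>
    if pvIsVowel c then
      ['o', 'b'] ++ (c :: rest).takeWhile pvIsVowel ++ pvRuns ((c :: rest).dropWhile pvIsVowel)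
    else
      c :: pvRuns rest
termination_by l => l.length
decreasing_by
  · rename_i h
    rw [List.dropWhile_cons, if_pos h]
    have := List.length_dropWhile_le pvIsVowel rest
    simp only [List.length_cons]; omega
  · simp

def to_obenglobish_alt (word : String) : String :=
  String.mk (pvRuns word.toList)

-- ===== PRECONDITION & SPEC =====
def Spec_to_obenglobish (word : String) (out : String) : Prop := out = to_obenglobish_alt word
instance (word : String) (out : String) : Decidable (Spec_to_obenglobish word out) := by unfold Spec_to_obenglobish; infer_instance

-- ===== CLAIM (what is proved, stated in full; the proofs are below) =====
def Claim_equal_to_obenglobish : Prop := ∀ (word : String), Dom_to_obenglobish word → Spec_to_obenglobish word (to_obenglobish word)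

-- ===== LEMMAS AND PROOFS =====

-- Equation lemmas for the run scanner
theorem pvRuns_nil : pvRuns [] = [] := by rw [pvRuns]

theorem pvRuns_cons_vowel (c : Char) (rest : List Char) (h : pvIsVowel c = true) :
    pvRuns (c :: rest) = ['o', 'b'] ++ (c :: rest).takeWhile pvIsVowel ++ pvRuns ((c :: rest).dropWhile pvIsVowel) := by
  rw [pvRuns]; simp [h]

theorem pvRuns_cons_not (c : Char) (rest : List Char) (h : pvIsVowel c = false) :
    pvRuns (c :: rest) = c :: pvRuns rest := by
  rw [pvRuns]; simp [h]

-- Left-to-right rendering with the previous character carried along (' ' is the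
-- non-vowel sentinel for position 0); both ports are reduced to this.
def pvGo (p : Char) : List Char → List Char
  | [] => []
  | c :: rest =>
    (if pvIsVowel c && !(pvIsVowel p) then ['o', 'b'] else []) ++ c :: pvGo c rest

theorem pvGo_snoc (p y : Char) (xs : List Char) :
    pvGo p (xs ++ [y]) =
      pvGo p xs ++ (if pvIsVowel y && !(pvIsVowel ((p :: xs).getLast (by simp))) then ['o', 'b'] else []) ++ [y] := by
  induction xs generalizing p with
  | nil => simp [pvGo]
  | cons x t ih =>
    simp only [List.cons_append, pvGo, ih x]
    have : (p :: x :: t).getLast (by simp) = (x :: t).getLast (by simp) := by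
      simp [List.getLast_cons]
    rw [this]
    simp

theorem pvGo_eq (cs : List Char) (p : Char) :
    pvGo p cs =
      if pvIsVowel p then cs.takeWhile pvIsVowel ++ pvRuns (cs.dropWhile pvIsVowel)
      else pvRuns cs := by
  induction cs generalizing p with
  | nil => simp [pvGo, pvRuns_nil]
  | cons c rest ih =>
    by_cases hc : pvIsVowel c <;> by_cases hp : pvIsVowel p
    · simp only [pvGo, hc, hp, Bool.not_true, Bool.and_false, Bool.false_eq_true, if_false,
        List.nil_append, if_true, List.takeWhile_cons, List.dropWhile_cons, ih c]
      simp [hc]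
    · rw [pvRuns_cons_vowel c rest hc]
      have hp' : pvIsVowel p = false := by simpa using hp
      simp only [pvGo, hc, hp', Bool.not_false, Bool.and_true, if_true, Bool.false_eq_true,
        if_false, ih c, List.takeWhile_cons, List.dropWhile_cons]
      simp [hc]
    · have hc' : pvIsVowel c = false := by simpa using hc
      rw [pvGo]
      simp only [hc', Bool.false_and, Bool.false_eq_true, if_false, List.nil_append, hp, if_true,
        List.takeWhile_cons, List.dropWhile_cons, ih c]
      exact (pvRuns_cons_not c rest hc').symm
    · have hc' : pvIsVowel c = false := by simpa using hc
      have hp' : pvIsVowel p = false := by simpa using hp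
      rw [pvGo, pvRuns_cons_not c rest hc']
      simp [hc', hp', ih c]

theorem pvGo_eq_pvRuns (cs : List Char) (p : Char) (hp : pvIsVowel p = false) :
    pvGo p cs = pvRuns cs := by
  rw [pvGo_eq, hp]; simp

theorem pvGetLast_congr (l₁ l₂ : List Char) (h : l₁ = l₂) (h1 : l₁ ≠ []) :
    l₁.getLast h1 = l₂.getLast (h ▸ h1) := by subst h; rfl

-- The sentinel-prefixed predecessor of index n in cs.
theorem getLast_space_take (cs : List Char) (n : Nat) (hn : n ≤ cs.length) :
    ((' ' :: cs.take n).getLast (by simp)) = if n = 0 then ' ' else cs.getD (n - 1) ' ' := by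
  cases n with
  | zero => simp
  | succ m =>
    have hm : m < cs.length := by omega
    have h1 : ' ' :: cs.take (m + 1) = (' ' :: cs.take m) ++ [cs[m]] := by
      rw [← List.take_concat_get' cs m hm]; rfl
    rw [pvGetLast_congr _ _ h1, List.getLast_append_of_ne_nil (List.cons_ne_nil _ _)]
    · simp [List.getD_eq_getElem?_getD, hm]
    · exact List.cons_ne_nil _ _

theorem foldA_eq_pvGo (cs : List Char) (n : Nat) (hn : n ≤ cs.length) :
    (PySem.List.pyRange 0 (n : Int) 1).foldl
      (fun (acc : List Char) (i : Int) =>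
        let c := cs.getD i.toNat ' '
        let acc :=
          if pvVowels.contains c then
            if i == 0 then acc ++ ['o', 'b']
            else if !(pvVowels.contains (cs.getD (i - 1).toNat ' ')) then acc ++ ['o', 'b']
            else acc
          else if c == 'e' && i == (cs.length : Int) - 1 then acc
          else acc
        acc ++ [c]) []
    = pvGo ' ' (cs.take n) := by
  induction n with
  | zero => simp [PySem.List.pyRange_one_eq_nil, pvGo]
  | succ m ih =>
    have hm : m ≤ cs.length := by omega
    have hcast : ((m + 1 : Nat) : Int) = (m : Int) + 1 := by push_cast; ring
    rw [hcast, PySem.List.pyRange_one_succ_right (by positivity), List.foldl_append, ih hm]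
    have htake : cs.take (m + 1) = cs.take m ++ [cs.getD m ' '] := by
      have hmlt : m < cs.length := by omega
      rw [← List.take_concat_get' cs m hmlt]
      simp [List.getD_eq_getElem?_getD, hmlt]
    rw [htake, pvGo_snoc, getLast_space_take cs m hm]
    have htn : (m : Int).toNat = m := by simp
    have htp : ((m : Int) - 1).toNat = m - 1 := by omega
    have hsp : ' ' ∉ pvVowels := by decide
    simp only [List.foldl_cons, List.foldl_nil, htn, htp, List.getD_eq_getElem?_getD]
    by_cases hv : cs[m]?.getD ' ' ∈ pvVowels
    · by_cases hm0 : m = 0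
      · subst hm0
        simp [pvIsVowel, hv, hsp]
      · have hne : ((m : Int) == 0) = false := by
          simp only [beq_eq_false_iff_ne, ne_eq]
          exact_mod_cast hm0
        by_cases hpv : cs[m - 1]?.getD ' ' ∈ pvVowels
        · simp [pvIsVowel, hv, hne, hm0, hpv]
        · simp [pvIsVowel, hv, hne, hm0, hpv]
    · simp [pvIsVowel, hv, ite_self]

-- ===== VERDICT (by name: the statement is the Claim_ definition above) =====
theorem to_obenglobish_spec : Claim_equal_to_obenglobish := by
  intro word _
  unfold Spec_to_obenglobish to_obenglobish to_obenglobish_alt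
  simp only [foldA_eq_pvGo word.toList word.toList.length le_rfl, List.take_length,
    pvGo_eq_pvRuns word.toList ' ' (by decide)]
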